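-- pv_equiv track=rewrite | github.com/nikovrdoljak/aoc2019 | day04/day04.py | isValidPassword2
-- ===== SOURCE A (Python) =====
-- def isValidPassword2(pwd):
--     spwd = str(pwd)
--     isSixDigit = False
--     hasTwoAdjacentDigits = False
--     hasExactlyTwoAdjacentDigits = False
--     digitsNeverDecrease = True
--     twoDigitsMatch = False
--     countAdjacentDigits = 0
--     countDoubles = 0
--
--     if ( pwd >= 100000 and pwd <= 999999 ):
--         isSixDigit = True
--
--     cPrev = ''
--     group = ''
--     groups = []
--     nPrev = 0
--     for c in spwd:
--
--         if c == cPrev: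
--             group += c
--         elif c != cPrev and len(group) > 0:
--             groups.append(group)
--             group = c
--         else:
--             group = c
--
--         n = int(c)
--         if n < nPrev:
--             digitsNeverDecrease = False
--         nPrev = n
--         cPrev = c
--
--     groups.append(group)
--
--     for g in groups:
--         if len(g) == 2:
--             hasExactlyTwoAdjacentDigits = True
--
--     return isSixDigit and hasExactlyTwoAdjacentDigits and digitsNeverDecrease
-- ===== SOURCE B (Python) =====
-- def isValidPassword2(pwd):
--     if not (100000 <= pwd <= 999999):
--         return False
--     digits = list(str(pwd))
--     return sorted(digits) == digits and any(digits.count(c) == 2 for c in "0123456789")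
-- ===== Notes on version B (the rewrite author's own statement) =====
-- stated objective: simpler
-- what changed: A's manual run-grouping loop (cPrev/group/groups) plus pairwise-decrease flag is replaced by comparing the digit list with its sorted copy and testing whether some digit occurs exactly twice; under non-decrease that is the same as an adjacent run of exactly two.
import Mathlib
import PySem

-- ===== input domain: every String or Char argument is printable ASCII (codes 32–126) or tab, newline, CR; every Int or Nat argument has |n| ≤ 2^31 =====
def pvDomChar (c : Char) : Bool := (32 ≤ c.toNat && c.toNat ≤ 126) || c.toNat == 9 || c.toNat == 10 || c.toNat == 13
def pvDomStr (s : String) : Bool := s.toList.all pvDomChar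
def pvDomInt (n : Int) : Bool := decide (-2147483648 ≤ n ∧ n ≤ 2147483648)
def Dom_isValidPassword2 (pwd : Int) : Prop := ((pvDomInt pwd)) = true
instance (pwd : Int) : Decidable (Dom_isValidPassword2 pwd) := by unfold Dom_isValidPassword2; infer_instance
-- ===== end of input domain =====

-- B replaces A's manual run-grouping and pairwise-decrease loop by a sorted-comparison plus
-- per-digit count test (objective: simpler); equivalence is about the return value only.

-- ===== PORT A =====
-- int(c) for a single char; exact on digit chars (on anything else Python raises ValueError,
-- which Pre_ excludes: for pwd < 0 str(pwd) contains '-')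
def pvValA (c : Char) : Int := (PySem.Int.ofChars? [c]).getD 0

-- one iteration of A's for-loop; state = (cPrev, group, groups, nPrev, digitsNeverDecrease)
def pvStepA (st : Option Char × List Char × List (List Char) × Int × Bool) (c : Char) :
    Option Char × List Char × List (List Char) × Int × Bool :=
  let (group', groups') :=
    if some c == st.1 then (st.2.1 ++ [c], st.2.2.1)
    else if some c != st.1 && decide (0 < st.2.1.length) then ([c], st.2.2.1 ++ [st.2.1])
    else ([c], st.2.2.1)
  let n := pvValA c
  (some c, group', groups', n, if n < st.2.2.2.1 then false else st.2.2.2.2)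

def isValidPassword2 (pwd : Int) : Bool :=
  let spwd := PySem.Int.toStr pwd
  let isSixDigit := decide (100000 ≤ pwd) && decide (pwd ≤ 999999)
  let st := spwd.toList.foldl pvStepA (none, [], [], 0, true)
  let groups := st.2.2.1 ++ [st.2.1]
  let hasExactlyTwoAdjacentDigits :=
    groups.foldl (fun acc g => if g.length == 2 then true else acc) false
  isSixDigit && hasExactlyTwoAdjacentDigits && st.2.2.2.2

-- ===== PORT B =====
def isValidPassword2_alt (pwd : Int) : Bool :=
  if !(decide (100000 ≤ pwd) && decide (pwd ≤ 999999)) then false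
  else
    let digits := (PySem.Int.toStr pwd).toList
    (PySem.List.sorted digits (fun c => c) false == digits) &&
      ("0123456789".toList.any (fun c => PySem.List.count digits c == 2))

-- ===== PRECONDITION & SPEC =====
-- Pre_ excludes negative pwd: there str(pwd) starts with a minus sign and A's int(c) raises ValueError.
def Pre_isValidPassword2 (pwd : Int) : Prop := 0 ≤ pwd
instance (pwd : Int) : Decidable (Pre_isValidPassword2 pwd) := by unfold Pre_isValidPassword2; infer_instance
def pvWitness_isValidPassword2 : Int := (123455)

def Spec_isValidPassword2 (pwd : Int) (out : Bool) : Prop := out = isValidPassword2_alt pwd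
instance (pwd : Int) (out : Bool) : Decidable (Spec_isValidPassword2 pwd out) := by unfold Spec_isValidPassword2; infer_instance

-- ===== CLAIM (what is proved, stated in full; the proofs are below) =====
def Claim_equal_isValidPassword2 : Prop := ∀ (pwd : Int), Dom_isValidPassword2 pwd → Pre_isValidPassword2 pwd → Spec_isValidPassword2 pwd (isValidPassword2 pwd)

-- ===== LEMMAS AND PROOFS =====

-- proof-side recursion: 'some maximal run from here on has length exactly 2', entered with
-- current run char p seen k times
def pvTwoRun (p : Char) (k : Nat) : List Char → Bool
  | [] => k == 2
  | c :: cs => if c = p then pvTwoRun p (k + 1) cs else (k == 2) || pvTwoRun c 1 cs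

-- proof-side recursion for A's digitsNeverDecrease flag
def pvMono (n : Int) : List Char → Bool
  | [] => true
  | c :: cs => (!(decide (pvValA c < n))) && pvMono (pvValA c) cs

theorem digit_mem_ten (c : Char) (h : c.isDigit = true) :
    c ∈ ['0','1','2','3','4','5','6','7','8','9'] := by
  simp only [Char.isDigit, Bool.and_eq_true, decide_eq_true_eq, ge_iff_le,
    UInt32.le_iff_toNat_le] at h
  have h1 : 48 ≤ c.toNat := h.1
  have h2 : c.toNat ≤ 57 := h.2
  have hc : c = Char.ofNat c.toNat := (Char.ofNat_toNat c).symm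
  have hv : c.toNat = 48 ∨ c.toNat = 49 ∨ c.toNat = 50 ∨ c.toNat = 51 ∨
      c.toNat = 52 ∨ c.toNat = 53 ∨ c.toNat = 54 ∨ c.toNat = 55 ∨
      c.toNat = 56 ∨ c.toNat = 57 := by omega
  rcases hv with h|h|h|h|h|h|h|h|h|h <;> rw [h] at hc <;> rw [hc] <;> decide

theorem pvValA_nonneg (c : Char) (h : c.isDigit = true) : 0 ≤ pvValA c := by
  have hm := digit_mem_ten c h
  fin_cases hm <;> decide

theorem pvValA_lt_iff (c d : Char) (hc : c.isDigit = true) (hd : d.isDigit = true) :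
    (pvValA c < pvValA d) ↔ c < d := by
  have hm := digit_mem_ten c hc
  have hm' := digit_mem_ten d hd
  fin_cases hm <;> fin_cases hm' <;> decide

-- dnd/nPrev projection of A's fold
theorem foldA_dnd (s : List Char) (cp : Option Char) (g : List Char) (gs : List (List Char))
    (n : Int) (d : Bool) :
    (s.foldl pvStepA (cp, g, gs, n, d)).2.2.2.2 = (d && pvMono n s) := by
  induction s generalizing cp g gs n d with
  | nil => simp [pvMono]
  | cons c cs ih =>
    simp only [List.foldl_cons, pvStepA, pvMono]
    rw [ih]
    by_cases h : pvValA c < n <;> simp [h]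

-- pvMono of a digit list states char-sortedness
theorem pvMono_cons (p : Char) (s : List Char) (hp : p.isDigit = true)
    (hs : ∀ c ∈ s, c.isDigit = true) :
    pvMono (pvValA p) s = decide (List.IsChain (· ≤ ·) (p :: s)) := by
  induction s generalizing p with
  | nil => simp [pvMono]
  | cons c cs ih =>
    have hc : c.isDigit = true := hs c (by simp)
    rw [pvMono, ih c hc (fun x hx => hs x (by simp [hx]))]
    have : (pvValA c < pvValA p) ↔ c < p := pvValA_lt_iff c p hc hp
    by_cases h : c < p
    · simp [List.isChain_cons_cons, this, h, not_le.mpr h]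
    · simp [List.isChain_cons_cons, this, h, not_lt.mp h]

theorem pvMono_zero (s : List Char) (hs : ∀ c ∈ s, c.isDigit = true) :
    pvMono 0 s = decide (List.IsChain (· ≤ ·) s) := by
  cases s with
  | nil => simp [pvMono]
  | cons c cs =>
    have hc : c.isDigit = true := hs c (by simp)
    rw [pvMono, pvMono_cons c cs hc (fun x hx => hs x (by simp [hx]))]
    simp [not_lt.mpr (pvValA_nonneg c hc)]

theorem foldl_or_any (l : List (List Char)) (b : Bool) :
    l.foldl (fun acc g => if g.length == 2 then true else acc) b
      = (b || l.any (fun g => g.length == 2)) := by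
  induction l generalizing b with
  | nil => simp
  | cons g gs ih =>
    simp only [List.foldl_cons, List.any_cons]
    rw [ih]
    have h2 : (if (g.length == 2) = true then true else b) = (b || (g.length == 2)) := by
      by_cases h : g.length = 2 <;> simp [h]
    rw [h2, Bool.or_assoc]

-- groups projection of A's fold
theorem foldA_groups (s : List Char) (p : Char) (g : List Char) (gs : List (List Char))
    (n : Int) (d : Bool) (hg : g ≠ []) :
    (((s.foldl pvStepA (some p, g, gs, n, d)).2.2.1
        ++ [(s.foldl pvStepA (some p, g, gs, n, d)).2.1]).any (fun x => x.length == 2))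
      = (gs.any (fun x => x.length == 2) || pvTwoRun p g.length s) := by
  induction s generalizing p g gs n d with
  | nil => simp [pvTwoRun]
  | cons c cs ih =>
    by_cases h : c = p
    · subst h
      rw [List.foldl_cons]
      rw [show pvStepA (some c, g, gs, n, d) c
           = (some c, g ++ [c], gs, pvValA c, if pvValA c < n then false else d) from by
            simp [pvStepA]]
      rw [ih c (g ++ [c]) gs _ _ (by simp)]
      simp [pvTwoRun]
    · rw [List.foldl_cons]
      rw [show pvStepA (some p, g, gs, n, d) c
           = (some c, [c], gs ++ [g], pvValA c, if pvValA c < n then false else d) from by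
            simp [pvStepA, h, List.length_pos_iff.mpr hg]]
      rw [ih c [c] (gs ++ [g]) _ _ (by simp)]
      simp [pvTwoRun, h, Bool.or_assoc]

-- characterisation of pvTwoRun on a sorted tail
theorem pvTwoRun_eq (s : List Char) (p : Char) (k : Nat)
    (hsort : List.Pairwise (· ≤ ·) (p :: s)) :
    pvTwoRun p k s = true ↔ (k + s.count p = 2 ∨ ∃ d ∈ s, d ≠ p ∧ s.count d = 2) := by
  induction s generalizing p k with
  | nil => simp [pvTwoRun]
  | cons c cs ih =>
    have hsort' : List.Pairwise (· ≤ ·) (c :: cs) := hsort.tail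
    by_cases h : c = p
    · subst h
      rw [pvTwoRun, if_pos rfl, ih c (k + 1) hsort']
      constructor
      · rintro (h1 | ⟨d, hd, hdc, hcnt⟩)
        · left; simp [List.count_cons]; omega
        · right; exact ⟨d, by simp [hd], hdc, by simp [List.count_cons, Ne.symm hdc]; omega⟩
      · rintro (h1 | ⟨d, hd, hdc, hcnt⟩)
        · left; simp [List.count_cons] at h1; omega
        · right
          rcases List.mem_cons.mp hd with h | h
          · exact absurd h hdc
          · exact ⟨d, h, hdc, by simp [List.count_cons, Ne.symm hdc] at hcnt; omega⟩
    · have hpc : p < c := lt_of_le_of_ne (List.rel_of_pairwise_cons hsort (by simp)) (Ne.symm h)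
      have hnp : ∀ d ∈ c :: cs, d ≠ p := by
        intro d hd
        rcases List.mem_cons.mp hd with h' | h'
        · subst h'; exact h
        · have : c ≤ d := List.rel_of_pairwise_cons hsort' h'
          exact fun he => absurd (he ▸ this) (not_le.mpr hpc)
      have hcount : (c :: cs).count p = 0 := by
        rw [List.count_eq_zero]; intro hmem; exact hnp p hmem rfl
      rw [pvTwoRun, if_neg h]
      constructor
      · intro hor
        rcases Bool.or_eq_true_iff.mp hor with h1 | h1
        · left; simp at h1; omega
        · rcases (ih c 1 hsort').mp h1 with h2 | ⟨d, hd, hdc, hcnt⟩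
          · right; exact ⟨c, by simp, h, by simp [List.count_cons]; omega⟩
          · right
            exact ⟨d, by simp [hd], hnp d (by simp [hd]), by simp [List.count_cons, Ne.symm hdc]; omega⟩
      · rintro (h1 | ⟨d, hd, hdp, hcnt⟩)
        · apply Bool.or_eq_true_iff.mpr; left; simp; omega
        · apply Bool.or_eq_true_iff.mpr; right
          apply (ih c 1 hsort').mpr
          rcases List.mem_cons.mp hd with h' | h'
          · subst h'
            left; simp [List.count_cons] at hcnt; omega
          · by_cases hdc : d = c
            · subst hdc
              left; simp [List.count_cons] at hcnt; omega
            · right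
              exact ⟨d, h', hdc, by simp [List.count_cons, Ne.symm hdc] at hcnt; omega⟩

theorem sorted_self_iff (s : List Char) :
    (PySem.List.sorted s (fun c => c) false == s) = decide (List.Pairwise (· ≤ ·) s) := by
  by_cases h : List.Pairwise (· ≤ ·) s
  · simp [h, PySem.List.sorted_eq_self_of_pairwise s (fun c => c) h]
  · simp [h]
    intro he
    exact h (by simpa using he ▸ PySem.List.sorted_pairwise s (fun c => c))

theorem toChars_digits (pwd : Int) (h : 0 ≤ pwd) :
    ∀ c ∈ (PySem.Int.toStr pwd).toList, c.isDigit = true := by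
  intro c hc
  rw [PySem.Int.toList_toStr] at hc
  simp only [PySem.Int.toChars, if_neg (not_lt.mpr h)] at hc
  exact Nat.isDigit_of_mem_toDigits (by norm_num) (by norm_num) hc

theorem any_digit_count (s : List Char) (hs : ∀ c ∈ s, c.isDigit = true) :
    ("0123456789".toList.any (fun c => PySem.List.count s c == 2)) = true
      ↔ ∃ d ∈ s, s.count d = 2 := by
  simp only [List.any_eq_true, PySem.List.count_eq, beq_iff_eq]
  constructor
  · rintro ⟨d, _, h2⟩
    have hd : d ∈ s := List.count_pos_iff.mp (by omega)
    exact ⟨d, hd, h2⟩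
  · rintro ⟨d, hd, h2⟩
    refine ⟨d, ?_, h2⟩
    have : "0123456789".toList = ['0','1','2','3','4','5','6','7','8','9'] := by decide
    rw [this]
    exact digit_mem_ten d (hs d hd)

theorem twoRun_head (c : Char) (cs : List Char)
    (hsort : List.Pairwise (· ≤ ·) (c :: cs)) :
    pvTwoRun c 1 cs = true ↔ ∃ d ∈ (c :: cs), (c :: cs).count d = 2 := by
  rw [pvTwoRun_eq cs c 1 hsort]
  constructor
  · rintro (h1 | ⟨d, hd, hdc, h2⟩)
    · exact ⟨c, by simp, by simp [List.count_cons]; omega⟩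
    · exact ⟨d, by simp [hd], by simp [List.count_cons, Ne.symm hdc]; omega⟩
  · rintro ⟨d, hd, h2⟩
    rcases List.mem_cons.mp hd with h | h
    · subst h; left; simp [List.count_cons] at h2; omega
    · by_cases hdc : d = c
      · subst hdc; left; simp [List.count_cons] at h2; omega
      · right
        exact ⟨d, h, hdc, by simp [List.count_cons, Ne.symm hdc] at h2; omega⟩

-- ===== VERDICT (by name: the statement is the Claim_ definition above) =====
theorem isValidPassword2_spec : Claim_equal_isValidPassword2 := by
  intro pwd hdom hpre
  unfold Spec_isValidPassword2
  unfold Pre_isValidPassword2 at hpre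
  by_cases hr : (100000 ≤ pwd ∧ pwd ≤ 999999)
  · obtain ⟨h1, h2⟩ := hr
    have hs := toChars_digits pwd hpre
    have hne : (PySem.Int.toStr pwd).toList ≠ [] := by
      rw [PySem.Int.toList_toStr]
      simp only [PySem.Int.toChars, if_neg (not_lt.mpr hpre)]
      exact List.ne_nil_of_length_pos Nat.length_toDigits_pos
    obtain ⟨c, cs, hsc⟩ := List.exists_cons_of_ne_nil hne
    have hcdig : c.isDigit = true := hs c (by rw [hsc]; simp)
    simp only [isValidPassword2, isValidPassword2_alt, hsc]
    -- A's hasExact flag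
    rw [foldl_or_any]
    rw [List.foldl_cons]
    rw [show pvStepA (none, [], [], 0, true) c
         = (some c, [c], [], pvValA c, if pvValA c < 0 then false else true) from by
          simp [pvStepA]]
    rw [foldA_groups cs c [c] [] _ _ (by simp)]
    -- A's digitsNeverDecrease flag
    have hdnd : ((c :: cs).foldl pvStepA (none, [], [], 0, true)).2.2.2.2
        = decide (List.IsChain (· ≤ ·) (c :: cs)) := by
      rw [foldA_dnd, Bool.true_and, pvMono_zero _ (by rw [hsc] at hs; exact hs)]
    rw [List.foldl_cons] at hdnd
    rw [show pvStepA (none, [], [], 0, true) c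
         = (some c, [c], [], pvValA c, if pvValA c < 0 then false else true) from by
          simp [pvStepA]] at hdnd
    rw [hdnd]
    -- B's sorted test
    rw [sorted_self_iff]
    simp only [h1, h2, decide_true, Bool.and_true, Bool.true_and, Bool.false_or,
      List.any_nil, Bool.not_true, Bool.false_eq_true, if_false, List.length_cons,
      List.length_nil, Nat.zero_add]
    by_cases hp : List.Pairwise (· ≤ ·) (c :: cs)
    · have hch : List.IsChain (· ≤ ·) (c :: cs) := List.isChain_iff_pairwise.mpr hp
      simp only [hp, hch, decide_true, Bool.and_true, Bool.true_and]
      rw [Bool.eq_iff_iff]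
      rw [twoRun_head c cs hp, any_digit_count _ (by rw [hsc] at hs; exact hs)]
    · have hch : ¬ List.IsChain (· ≤ ·) (c :: cs) := fun h => hp (List.isChain_iff_pairwise.mp h)
      simp [hp, hch]
  · simp only [isValidPassword2, isValidPassword2_alt]
    rcases not_and_or.mp hr with h | h <;> simp [h]
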